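-- pv_equiv track=rewrite | github.com/htalebiyan/Dec2py | codes/Sensitivity_SALib/plot.py | correct_legend_labels
-- ===== SOURCE A (Python) =====
-- def correct_legend_labels(labels):
--     labels = ['N-INRG' if x == 'ng' else x for x in labels]
--     labels = ['B-INRG-All cu' if x == 'bgCCCCUUUU' else x for x in labels]
--     labels = ['B-INRG-All cu ex. Power' if x == 'bgCCNCUUUU' else x for x in labels]
--     labels = ['B-INRG-All nu' if x == 'bgNNNNUUUU' else x for x in labels]
--     labels = ['B-INRG-nn' if x == 'bgNNUU' else x for x in labels]
--     labels = ['B-INRG-cn' if x == 'bgCNUU' else x for x in labels]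
--     labels = ['B-INRG-nc' if x == 'bgNCUU' else x for x in labels]
--     labels = ['B-INRG-cc' if x == 'bgCCUU' else x for x in labels]
--     labels = ['Rationality' if x == 'rationality' else x for x in labels]
--     labels = ['br_level' if x == 'bounded rationality level' else x for x in labels]
--     return labels
-- ===== SOURCE B (Python) =====
-- def _relabel(x):
--     # fixed one-off renames
--     if x == 'ng':
--         return 'N-INRG'
--     if x == 'rationality':
--         return 'Rationality'
--     if x == 'bounded rationality level':
--         return 'br_level'
--     # the four two-letter bilevel codes bg<P><Q>UU (P,Q in {C,N}) are decoded
--     # structurally: the replacement is computed from the code's own characters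
--     if len(x) == 6 and x.startswith('bg') and x.endswith('UU') and x[2] in 'CN' and x[3] in 'CN':
--         return 'B-INRG-' + x[2].lower() + x[3].lower()
--     # the three four-letter codes have irregular names; handle explicitly
--     if x == 'bgCCCCUUUU':
--         return 'B-INRG-All cu'
--     if x == 'bgCCNCUUUU':
--         return 'B-INRG-All cu ex. Power'
--     if x == 'bgNNNNUUUU':
--         return 'B-INRG-All nu'
--     return x
--
-- def correct_legend_labels(labels):
--     return [_relabel(x) for x in labels]
-- ===== Notes on version B (the rewrite author's own statement) =====
-- stated objective: alternative
-- what changed: Instead of ten whole-list substitution passes, B classifies each label once and COMPUTES the replacement for the whole bg<P><Q>UU family (P,Q in {C,N}) from the label's own characters ('B-INRG-' + lowercased code letters), keeping explicit cases only for the irregular names; correctness rests on the fact that exactly the four two-letter codes satisfy the structural test.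
import Mathlib
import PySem

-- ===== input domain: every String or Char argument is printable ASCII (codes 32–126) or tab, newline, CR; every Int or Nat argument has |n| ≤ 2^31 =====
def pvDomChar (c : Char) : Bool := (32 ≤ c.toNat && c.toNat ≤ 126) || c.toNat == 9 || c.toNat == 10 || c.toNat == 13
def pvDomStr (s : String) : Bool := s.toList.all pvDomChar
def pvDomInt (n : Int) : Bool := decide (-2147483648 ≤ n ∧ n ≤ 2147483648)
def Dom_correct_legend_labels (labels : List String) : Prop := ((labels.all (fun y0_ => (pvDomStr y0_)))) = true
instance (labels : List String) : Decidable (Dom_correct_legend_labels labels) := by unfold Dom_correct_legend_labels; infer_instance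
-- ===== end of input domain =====

-- B replaces A's ten whole-list substitution passes by a per-label classifier that COMPUTES
-- the replacement for the bg<P><Q>UU (P,Q ∈ {C,N}) family from the label's own characters
-- (alternative decomposition, same cost).


-- ===== PORT A =====
def correct_legend_labels (labels : List String) : List String :=
  let labels := labels.map (fun x => if x == "ng" then "N-INRG" else x)
  let labels := labels.map (fun x => if x == "bgCCCCUUUU" then "B-INRG-All cu" else x)
  let labels := labels.map (fun x => if x == "bgCCNCUUUU" then "B-INRG-All cu ex. Power" else x)
  let labels := labels.map (fun x => if x == "bgNNNNUUUU" then "B-INRG-All nu" else x)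
  let labels := labels.map (fun x => if x == "bgNNUU" then "B-INRG-nn" else x)
  let labels := labels.map (fun x => if x == "bgCNUU" then "B-INRG-cn" else x)
  let labels := labels.map (fun x => if x == "bgNCUU" then "B-INRG-nc" else x)
  let labels := labels.map (fun x => if x == "bgCCUU" then "B-INRG-cc" else x)
  let labels := labels.map (fun x => if x == "rationality" then "Rationality" else x)
  let labels := labels.map (fun x => if x == "bounded rationality level" then "br_level" else x)
  labels

-- ===== PORT B =====
-- x[i] in 'CN' (a 1-char string against a 2-char string) is char equality with 'C' or 'N'
def pvCodeLetter (oc : Option Char) : Bool :=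
  match oc with
  | some c => c == 'C' || c == 'N'
  | none => false

-- x[i].lower() for the concatenation (as a char list; the Python slot is always filled)
def pvLowered (oc : Option Char) : List Char :=
  match oc with
  | some c => [PySem.Chars.lowerChar c]
  | none => []

def pvRelabel (x : String) : String :=
  if x == "ng" then "N-INRG"
  else if x == "rationality" then "Rationality"
  else if x == "bounded rationality level" then "br_level"
  else if PySem.Str.len x == 6 && PySem.Str.startswith x "bg" && PySem.Str.endswith x "UU"
       && pvCodeLetter (PySem.Str.pyGet? x 2) && pvCodeLetter (PySem.Str.pyGet? x 3) then
    String.ofList ("B-INRG-".toList ++ pvLowered (PySem.Str.pyGet? x 2) ++ pvLowered (PySem.Str.pyGet? x 3))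
  else if x == "bgCCCCUUUU" then "B-INRG-All cu"
  else if x == "bgCCNCUUUU" then "B-INRG-All cu ex. Power"
  else if x == "bgNNNNUUUU" then "B-INRG-All nu"
  else x

def correct_legend_labels_alt (labels : List String) : List String :=
  labels.map pvRelabel

-- ===== PRECONDITION & SPEC =====
def Spec_correct_legend_labels (labels : List String) (out : List String) : Prop := out = correct_legend_labels_alt labels
instance (labels : List String) (out : List String) : Decidable (Spec_correct_legend_labels labels out) := by unfold Spec_correct_legend_labels; infer_instance

-- ===== CLAIM (what is proved, stated in full; the proofs are below) =====
def Claim_equal_correct_legend_labels : Prop := ∀ (labels : List String), Dom_correct_legend_labels labels → Spec_correct_legend_labels labels (correct_legend_labels labels)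

-- ===== LEMMAS AND PROOFS =====

-- A 6-char string passing B's structural test is one of the four two-letter codes.
theorem struct_mem (x : String)
    (h : (PySem.Str.len x == 6 && PySem.Str.startswith x "bg" && PySem.Str.endswith x "UU"
       && pvCodeLetter (PySem.Str.pyGet? x 2) && pvCodeLetter (PySem.Str.pyGet? x 3)) = true) :
    x = "bgCCUU" ∨ x = "bgCNUU" ∨ x = "bgNCUU" ∨ x = "bgNNUU" := by
  simp only [Bool.and_eq_true, PySem.Str.len_eq, PySem.Str.startswith_eq, PySem.Str.endswith_eq,
    PySem.Str.pyGet?_eq, beq_iff_eq] at h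
  obtain ⟨⟨⟨⟨hlen, hpre⟩, hsuf⟩, h2c⟩, h3c⟩ := h
  have hl6 : x.toList.length = 6 := by
    have h' := String.length_toList (s := x); omega
  obtain ⟨a, b, c, d, e, f, hl⟩ : ∃ a b c d e f, x.toList = [a,b,c,d,e,f] := by
    rcases hx : x.toList with _|⟨a,_|⟨b,_|⟨c,_|⟨d,_|⟨e,_|⟨f,rest⟩⟩⟩⟩⟩⟩ <;>
      rw [hx] at hl6 <;> simp at hl6
    exact ⟨a,b,c,d,e,f, by simp [hl6]⟩
  rw [hl] at hpre hsuf h2c h3c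
  rw [PySem.Chars.startswith_iff] at hpre
  rw [PySem.Chars.endswith_iff] at hsuf
  simp [List.cons_prefix_cons] at hpre
  obtain ⟨rfl, rfl⟩ := hpre
  have hef : e = 'U' ∧ f = 'U' := by
    obtain ⟨t, ht⟩ := hsuf
    have ht4 : t.length = 4 := by
      have := congrArg List.length ht; simp at this; omega
    match t, ht4 with
    | [p,q,r,s], _ =>
      simp at ht
      exact ⟨ht.2.2.2.2.1.symm, ht.2.2.2.2.2.symm⟩
  obtain ⟨rfl, rfl⟩ := hef
  have hc : c = 'C' ∨ c = 'N' := by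
    simp [PySem.List.pyGet?, PySem.List.pyIdx?, pvCodeLetter] at h2c
    tauto
  have hd : d = 'C' ∨ d = 'N' := by
    simp [PySem.List.pyGet?, PySem.List.pyIdx?, pvCodeLetter] at h3c
    tauto
  rcases hc with rfl | rfl <;> rcases hd with rfl | rfl
  · exact Or.inl (String.toList_inj.mp (hl.trans (by decide)))
  · exact Or.inr (Or.inl (String.toList_inj.mp (hl.trans (by decide))))
  · exact Or.inr (Or.inr (Or.inl (String.toList_inj.mp (hl.trans (by decide)))))
  · exact Or.inr (Or.inr (Or.inr (String.toList_inj.mp (hl.trans (by decide)))))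

-- Pointwise: A's chain of ten conditional rewrites equals B's classifier.
theorem chain_eq_relabel (x : String) :
    (fun x => if x == "bounded rationality level" then "br_level" else x) ((fun x => if x == "rationality" then "Rationality" else x) ((fun x => if x == "bgCCUU" then "B-INRG-cc" else x) ((fun x => if x == "bgNCUU" then "B-INRG-nc" else x) ((fun x => if x == "bgCNUU" then "B-INRG-cn" else x) ((fun x => if x == "bgNNUU" then "B-INRG-nn" else x) ((fun x => if x == "bgNNNNUUUU" then "B-INRG-All nu" else x) ((fun x => if x == "bgCCNCUUUU" then "B-INRG-All cu ex. Power" else x) ((fun x => if x == "bgCCCCUUUU" then "B-INRG-All cu" else x) ((fun x => if x == "ng" then "N-INRG" else x) (x))))))))))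
    = pvRelabel x := by
  by_cases h1 : x = "ng"
  · subst h1; decide
  by_cases h2 : x = "bgCCCCUUUU"
  · subst h2; decide
  by_cases h3 : x = "bgCCNCUUUU"
  · subst h3; decide
  by_cases h4 : x = "bgNNNNUUUU"
  · subst h4; decide
  by_cases h5 : x = "bgNNUU"
  · subst h5; decide
  by_cases h6 : x = "bgCNUU"
  · subst h6; decide
  by_cases h7 : x = "bgNCUU"
  · subst h7; decide
  by_cases h8 : x = "bgCCUU"
  · subst h8; decide
  by_cases h9 : x = "rationality"
  · subst h9; decide
  by_cases h10 : x = "bounded rationality level"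
  · subst h10; decide
  have hs : ¬ (PySem.Str.len x == 6 && PySem.Str.startswith x "bg" && PySem.Str.endswith x "UU"
       && pvCodeLetter (PySem.Str.pyGet? x 2) && pvCodeLetter (PySem.Str.pyGet? x 3)) = true := by
    intro h
    rcases struct_mem x h with h' | h' | h' | h' <;> simp_all
  conv_rhs => rw [pvRelabel]
  rw [if_neg (by simp [h1]), if_neg (by simp [h9]), if_neg (by simp [h10]), if_neg hs,
    if_neg (by simp [h2]), if_neg (by simp [h3]), if_neg (by simp [h4])]
  simp [h1, h2, h3, h4, h5, h6, h7, h8, h9, h10]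

-- ===== VERDICT (by name: the statement is the Claim_ definition above) =====
set_option maxHeartbeats 1000000 in
theorem correct_legend_labels_spec : Claim_equal_correct_legend_labels := by
  intro labels _
  show correct_legend_labels labels = correct_legend_labels_alt labels
  simp only [correct_legend_labels, correct_legend_labels_alt, List.map_map]
  apply List.map_congr_left
  intro x _
  simp only [Function.comp_apply]
  exact chain_eq_relabel x
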